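-- pv_equiv track=rewrite | github.com/jomof/cloze-data | resources/grammar/calculate-grammar-point-dependencies.py | get_keys_with_second_highest_value
-- ===== SOURCE A (Python) =====
-- def get_keys_with_second_highest_value(d):
--     if not d:
--         return [] # Handle empty dictionary
--
--     # 1. Get all unique values
--     unique_values = sorted(list(set(d.values())), reverse=True)
--
--     # 2. Check if there's a second highest value
--     if len(unique_values) < 2:
--         return [] # Not enough unique values for a "second highest"
--
--     second_highest_value = unique_values[1] # The second element after sorting descending
--
--     # 3. Collect all keys that have this second highest value
--     keys_with_second_highest = [key for key, value in d.items() if value == second_highest_value and value > 1]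
--
--     return keys_with_second_highest
-- ===== SOURCE B (Python) =====
-- def get_keys_with_second_highest_value(d):
--     vals = list(d.values())
--     if not vals:
--         return []
--     m1 = max(vals)
--     lower = [v for v in vals if v < m1]
--     if not lower:
--         return []
--     m2 = max(lower)
--     return [k for k, v in d.items() if v == m2 and v > 1]
-- ===== Notes on version B (the rewrite author's own statement) =====
-- stated objective: alternative
-- what changed: Replaces deduplicating the values into a set and sorting it descending with two linear max passes (overall max, then max of values strictly below it) before the same filter pass.
import Mathlib
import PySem

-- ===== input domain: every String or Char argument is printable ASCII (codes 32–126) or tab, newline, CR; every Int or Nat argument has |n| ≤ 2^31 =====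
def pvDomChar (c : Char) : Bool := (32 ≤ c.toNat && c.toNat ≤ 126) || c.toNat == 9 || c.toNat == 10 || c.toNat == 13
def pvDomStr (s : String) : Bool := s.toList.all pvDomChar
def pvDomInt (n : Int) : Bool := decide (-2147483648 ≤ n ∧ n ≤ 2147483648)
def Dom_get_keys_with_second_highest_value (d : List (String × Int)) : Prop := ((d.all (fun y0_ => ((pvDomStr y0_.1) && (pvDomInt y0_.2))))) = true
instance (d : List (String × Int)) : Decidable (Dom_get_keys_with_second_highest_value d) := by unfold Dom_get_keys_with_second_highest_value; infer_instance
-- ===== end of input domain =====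

-- B replaces set-dedup + descending sort of the values by two linear max passes
-- (overall max, then max of values strictly below it) before the same filter pass.

-- ===== PORT A =====
def get_keys_with_second_highest_value (d : List (String × Int)) : List String :=
  if d = [] then []
  else
    let unique_values := PySem.List.sorted (PySem.Set.ofList (d.map Prod.snd)) (fun x => x) true
    if unique_values.length < 2 then []
    else
      let second_highest_value := PySem.List.pyGetD unique_values 1 0
      (d.filter (fun p => p.2 == second_highest_value && decide (1 < p.2))).map Prod.fst

-- ===== PORT B =====
def get_keys_with_second_highest_value_alt (d : List (String × Int)) : List String :=
  let vals := d.map Prod.snd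
  if vals = [] then []
  else
    match PySem.List.max? vals (fun x => x) with
    | none => []
    | some m1 =>
      let lower := vals.filter (fun v => decide (v < m1))
      match PySem.List.max? lower (fun x => x) with
      | none => []
      | some m2 => (d.filter (fun p => p.2 == m2 && decide (1 < p.2))).map Prod.fst

-- ===== PRECONDITION & SPEC =====
def Spec_get_keys_with_second_highest_value (d : List (String × Int)) (out : List String) : Prop := out = get_keys_with_second_highest_value_alt d
instance (d : List (String × Int)) (out : List String) : Decidable (Spec_get_keys_with_second_highest_value d out) := by unfold Spec_get_keys_with_second_highest_value; infer_instance

-- ===== CLAIM (what is proved, stated in full; the proofs are below) =====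
def Claim_equal_get_keys_with_second_highest_value : Prop := ∀ (d : List (String × Int)), Dom_get_keys_with_second_highest_value d → Spec_get_keys_with_second_highest_value d (get_keys_with_second_highest_value d)

-- ===== LEMMAS AND PROOFS =====

-- sorted(set(vs), reverse=True) is strictly decreasing
lemma sorted_set_rev_pairwise_gt (vs : List Int) :
    (PySem.List.sorted (PySem.Set.ofList vs) (fun x => x) true).Pairwise (· > ·) := by
  have hle := PySem.List.sorted_pairwise_rev (xs := PySem.Set.ofList vs) (key := fun x => x)
  have hnd : (PySem.List.sorted (PySem.Set.ofList vs) (fun x => x) true).Nodup :=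
    (PySem.List.sorted_perm (PySem.Set.ofList vs) (fun x => x) true).symm.nodup
      (PySem.Set.nodup_ofList vs)
  have := hnd.and hle
  exact this.imp (fun h => lt_of_le_of_ne h.2 (fun e => h.1 e.symm))

lemma mem_sorted_set_rev (vs : List Int) (x : Int) :
    x ∈ PySem.List.sorted (PySem.Set.ofList vs) (fun x => x) true ↔ x ∈ vs := by
  rw [PySem.List.mem_sorted, PySem.Set.mem_ofList]

-- ===== VERDICT (by name: the statement is the Claim_ definition above) =====
theorem get_keys_with_second_highest_value_spec : Claim_equal_get_keys_with_second_highest_value := by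
  intro d _
  unfold Spec_get_keys_with_second_highest_value
  unfold get_keys_with_second_highest_value get_keys_with_second_highest_value_alt
  by_cases hd : d = []
  · subst hd; rfl
  · have hvs : d.map Prod.snd ≠ [] := by simpa using hd
    simp only [hd, if_false]
    simp only [hvs, if_false]
    set vs := d.map Prod.snd with hvsdef
    set u := PySem.List.sorted (PySem.Set.ofList vs) (fun x => x) true with hu
    have hpw : List.Pairwise (· > ·) u := sorted_set_rev_pairwise_gt vs
    have hmem : ∀ x : Int, x ∈ u ↔ x ∈ vs := mem_sorted_set_rev vs
    obtain ⟨m1, hm1⟩ : ∃ m1, PySem.List.max? vs (fun x => x) = some m1 := by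
      cases hv : vs with
      | nil => exact absurd hv hvs
      | cons x t => exact ⟨_, PySem.List.max?_id_cons x t⟩
    have hm1mem : m1 ∈ vs := PySem.List.max?_mem hm1
    have hm1max : ∀ y ∈ vs, y ≤ m1 := PySem.List.max?_isMax hm1
    rw [hm1]
    match hcase : u with
    | [] =>
        have h := (hmem m1).mpr hm1mem
        simp at h
    | [a] =>
        -- only one distinct value: lower is empty, both sides return []
        have hall : ∀ v ∈ vs, v = a := by
          intro v hv
          have h := (hmem v).mpr hv
          simpa using h
        have hlower : vs.filter (fun v => decide (v < m1)) = [] := by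
          apply List.filter_eq_nil_iff.mpr
          intro v hv
          have hva := hall v hv
          have hm1a := hall m1 hm1mem
          simp [hva, hm1a]
        simp [hlower, PySem.List.max?]
    | a :: b :: t =>
        have hab : a > b := (List.pairwise_cons.mp hpw).1 b (by simp)
        have hat : ∀ y ∈ b :: t, a > y := (List.pairwise_cons.mp hpw).1
        have hbt : ∀ y ∈ t, b > y := (List.pairwise_cons.mp (List.pairwise_cons.mp hpw).2).1
        have hamem : a ∈ vs := (hmem a).mp (by simp)
        have hbmem : b ∈ vs := (hmem b).mp (by simp)
        have hm1a : m1 = a := by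
          have h1 : a ≤ m1 := hm1max a hamem
          have h2 : m1 = a ∨ m1 ∈ b :: t := by simpa using (hmem m1).mpr hm1mem
          rcases h2 with h2 | h2
          · exact h2
          · exact absurd (hat m1 h2) (by omega)
        have hblower : b ∈ vs.filter (fun v => decide (v < m1)) := by
          simp only [List.mem_filter]
          exact ⟨hbmem, by simp [hm1a, hab]⟩
        obtain ⟨m2, hm2⟩ : ∃ m2, PySem.List.max? (vs.filter (fun v => decide (v < m1))) (fun x => x) = some m2 := by
          cases hl : vs.filter (fun v => decide (v < m1)) with
          | nil => rw [hl] at hblower; exact absurd hblower (List.not_mem_nil)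
          | cons x t2 => exact ⟨_, PySem.List.max?_id_cons x t2⟩
        have hm2b : m2 = b := by
          have hm2mem := PySem.List.max?_mem hm2
          simp only [List.mem_filter, decide_eq_true_eq] at hm2mem
          have hble : b ≤ m2 := PySem.List.max?_isMax hm2 b hblower
          have hm2u : m2 = a ∨ m2 = b ∨ m2 ∈ t := by simpa using (hmem m2).mpr hm2mem.1
          rcases hm2u with h2 | h2 | h2
          · exfalso; omega
          · exact h2
          · exact absurd (hbt m2 h2) (by omega)
        have hsec : PySem.List.pyGetD (a :: b :: t) 1 (0 : Int) = b := by
          simp [PySem.List.pyGetD]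
        rw [if_neg (by simp)]
        simp [hsec, hm2, hm2b]
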